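-- pv_equiv track=rewrite | github.com/apdn7/AnalysisPlatformCloud | ap/common/common_utils.py | remove_subset
-- ===== SOURCE A (Python) =====
-- from typing import IO, List, TextIO, Tuple, Union
--
-- def is_subset(self, others):
--     self_len = len(self)
--     return any(self == other[:self_len] for other in others)
--
-- def remove_subset(columns: List[List]):
--     new_cols = []
--     for idx in range(len(columns)):
--         cols = columns[idx]
--         compare_cols = columns[:idx] + columns[idx + 1 :]
--         if not is_subset(cols, compare_cols):
--             new_cols.append(cols)
--
--     return new_cols
-- ===== SOURCE B (Python) =====
-- def remove_subset(columns):
--     # Count occurrences of each column list, and collect each column's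
--     # prefixes only at the lengths that occur among the columns; a column
--     # survives iff it is unique and no column strictly extends it.
--     count = {}
--     for cols in columns:
--         t = tuple(cols)
--         count[t] = count.get(t, 0) + 1
--     lengths = set(len(cols) for cols in columns)
--     prefixes = set()
--     for cols in columns:
--         t = tuple(cols)
--         for k in lengths:
--             if k < len(t):
--                 prefixes.add(t[:k])
--     return [cols for cols in columns
--             if count[tuple(cols)] == 1 and tuple(cols) not in prefixes]
-- ===== Notes on version B (the rewrite author's own statement) =====
-- stated objective: alternative
-- what changed: Replaced the all-pairs prefix scan with one counting pass plus a hash set of each column's prefixes at the lengths occurring among the columns, so each column is judged by two dictionary/set lookups instead of being compared against every other column.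
import Mathlib
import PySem

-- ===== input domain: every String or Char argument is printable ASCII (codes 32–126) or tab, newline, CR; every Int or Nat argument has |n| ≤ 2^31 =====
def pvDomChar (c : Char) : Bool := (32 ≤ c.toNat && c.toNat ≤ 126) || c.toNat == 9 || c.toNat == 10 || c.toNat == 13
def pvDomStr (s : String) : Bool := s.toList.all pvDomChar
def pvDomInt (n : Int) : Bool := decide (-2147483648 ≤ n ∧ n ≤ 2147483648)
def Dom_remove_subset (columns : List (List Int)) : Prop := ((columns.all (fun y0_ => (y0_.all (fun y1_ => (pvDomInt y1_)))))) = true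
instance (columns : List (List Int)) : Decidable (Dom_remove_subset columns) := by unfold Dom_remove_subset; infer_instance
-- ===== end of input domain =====

-- B replaces A's all-pairs prefix scan by one counting pass plus a set of the columns' prefixes at occurring lengths.

-- ===== PORT A =====
def is_subset (self : List Int) (others : List (List Int)) : Bool :=
  let self_len := self.length
  others.any (fun other => self == PySem.List.slice other none (some (self_len : Int)))

def remove_subset (columns : List (List Int)) : List (List Int) :=
  (PySem.List.pyRange 0 (columns.length : Int) 1).foldl
    (fun new_cols idx =>
      let cols := PySem.List.pyGetD columns idx []
      let compare_cols := PySem.List.slice columns none (some idx) ++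
                          PySem.List.slice columns (some (idx + 1)) none
      if !(is_subset cols compare_cols) then new_cols ++ [cols] else new_cols)
    []

-- ===== PORT B =====
def remove_subset_alt (columns : List (List Int)) : List (List Int) :=
  let count := columns.foldl (fun d cols => d.insert cols (d.getD cols 0 + 1))
    (PySem.Dict.empty : PySem.Dict (List Int) Int)
  let lengths := PySem.Set.ofList (columns.map (fun cols => (cols.length : Int)))
  let prefixes := columns.foldl
    (fun s cols => lengths.foldl
        (fun s k => if k < (cols.length : Int)
                    then PySem.Set.add s (PySem.List.slice cols none (some k)) else s) s)
    (PySem.Set.empty : PySem.Set (List Int))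
  columns.foldl
    (fun new_cols cols =>
      if count.getD cols 0 == 1 && !(PySem.Set.contains prefixes cols)
      then new_cols ++ [cols] else new_cols) []

-- ===== PRECONDITION & SPEC =====
def Spec_remove_subset (columns : List (List Int)) (out : List (List Int)) : Prop := out = remove_subset_alt columns
instance (columns : List (List Int)) (out : List (List Int)) : Decidable (Spec_remove_subset columns out) := by unfold Spec_remove_subset; infer_instance

-- ===== CLAIM (what is proved, stated in full; the proofs are below) =====
def Claim_equal_remove_subset : Prop := ∀ (columns : List (List Int)), Dom_remove_subset columns → Spec_remove_subset columns (remove_subset columns)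

-- ===== LEMMAS AND PROOFS =====

-- "c is removable": duplicated, or some column strictly extends it
def badBool (columns : List (List Int)) (c : List Int) : Bool :=
  decide (2 ≤ columns.count c) ||
  columns.any (fun o => decide (c.length < o.length) && (o.take c.length == c))

theorem is_subset_iff (c : List Int) (others : List (List Int)) :
    is_subset c others = true ↔ ∃ o ∈ others, o.take c.length = c := by
  simp only [is_subset, List.any_eq_true, beq_iff_eq, PySem.List.slice_to_natCast]
  constructor
  · rintro ⟨o, ho, h⟩; exact ⟨o, ho, h.symm⟩
  · rintro ⟨o, ho, h⟩; exact ⟨o, ho, h.symm⟩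

theorem badBool_iff (columns : List (List Int)) (c : List Int) :
    badBool columns c = true ↔
      2 ≤ columns.count c ∨ ∃ o ∈ columns, c.length < o.length ∧ o.take c.length = c := by
  simp [badBool]

theorem take_eq_self_iff_len_le (o c : List Int) (h : o.take c.length = c) :
    c.length ≤ o.length := by
  have := congrArg List.length h
  simp at this; omega

theorem cond_mid (pre suf : List (List Int)) (c : List Int) :
    is_subset c (pre ++ suf) = badBool (pre ++ c :: suf) c := by
  rw [Bool.eq_iff_iff, is_subset_iff, badBool_iff]
  constructor
  · rintro ⟨o, ho, hto⟩
    have hlen : c.length ≤ o.length := take_eq_self_iff_len_le o c hto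
    rcases Nat.lt_or_ge c.length o.length with hlt | hge
    · refine Or.inr ⟨o, ?_, hlt, hto⟩
      rcases List.mem_append.mp ho with h | h
      · exact List.mem_append.mpr (Or.inl h)
      · exact List.mem_append.mpr (Or.inr (List.mem_cons_of_mem _ h))
    · have heq : o = c := by
        rw [← hto]
        exact (List.take_of_length_le (by omega)).symm
      subst heq
      left
      have h1 : 1 ≤ pre.count o + suf.count o := by
        rcases List.mem_append.mp ho with h | h
        · have := List.count_pos_iff.mpr h; omega
        · have := List.count_pos_iff.mpr h; omega
      simp only [List.count_append, List.count_cons_self]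
      omega
  · rintro (hcnt | ⟨o, ho, hlt, hto⟩)
    · simp only [List.count_append, List.count_cons_self] at hcnt
      have hmem : c ∈ pre ∨ c ∈ suf := by
        rcases Nat.lt_or_ge 0 (pre.count c) with h | h
        · exact Or.inl (List.count_pos_iff.mp h)
        · exact Or.inr (List.count_pos_iff.mp (by omega))
      exact ⟨c, List.mem_append.mpr hmem, List.take_of_length_le le_rfl⟩
    · have hne : o ≠ c := fun h => by subst h; omega
      refine ⟨o, ?_, hto⟩
      rcases List.mem_append.mp ho with h | h
      · exact List.mem_append.mpr (Or.inl h)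
      · rcases List.mem_cons.mp h with h | h
        · exact absurd h hne
        · exact List.mem_append.mpr (Or.inr h)

theorem A_eq_filter (columns : List (List Int)) :
    remove_subset columns = columns.filter (fun c => !badBool columns c) := by
  unfold remove_subset
  rw [PySem.List.foldl_append_if
      (p := fun idx => !(is_subset (PySem.List.pyGetD columns idx [])
        (PySem.List.slice columns none (some idx) ++
         PySem.List.slice columns (some (idx + 1)) none)))
      (f := fun idx => PySem.List.pyGetD columns idx [])]
  rw [List.filter_congr (l := PySem.List.pyRange 0 (columns.length : Int) 1)
      (q := fun idx => !badBool columns (PySem.List.pyGetD columns idx []))]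
  · rw [show (fun idx => !badBool columns (PySem.List.pyGetD columns idx [])) =
        ((fun c => !badBool columns c) ∘ (fun idx => PySem.List.pyGetD columns idx [])) from rfl]
    rw [← List.filter_map]
    rw [PySem.List.map_pyGetD_pyRange_zero']
    simp
  · intro idx hidx
    rw [PySem.List.mem_pyRange_one] at hidx
    obtain ⟨h0, hlt⟩ := hidx
    obtain ⟨k, rfl⟩ := Int.eq_ofNat_of_zero_le h0
    have hk : k < columns.length := by exact_mod_cast hlt
    have hget : PySem.List.pyGetD columns (k : Int) [] = columns[k] := by
      simp [PySem.List.pyGetD_natCast, hk]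
    rw [hget]
    have h1 : PySem.List.slice columns none (some (k : Int)) = columns.take k :=
      PySem.List.slice_to_natCast columns k
    have h2 : PySem.List.slice columns (some ((k : Int) + 1)) none = columns.drop (k + 1) := by
      have : ((k : Int) + 1) = ((k + 1 : Nat) : Int) := by push_cast; ring
      rw [this, PySem.List.slice_from_natCast]
    rw [h1, h2]
    have hsplit : columns = columns.take k ++ columns[k] :: columns.drop (k + 1) := by
      conv_lhs => rw [← List.take_append_drop k columns]
      rw [List.drop_eq_getElem_cons hk]
    rw [congrArg Bool.not (cond_mid (columns.take k) (columns.drop (k+1)) columns[k])]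
    rw [← hsplit]

theorem mem_prefixes (cl : List (List Int)) (L : List Int) (s : PySem.Set (List Int))
    (x : List Int) :
    x ∈ cl.foldl
      (fun s cols => L.foldl
        (fun s k => if k < (cols.length : Int)
                    then PySem.Set.add s (PySem.List.slice cols none (some k)) else s) s) s ↔
    x ∈ s ∨ ∃ o ∈ cl, ∃ k ∈ L, k < (o.length : Int) ∧ PySem.List.slice o none (some k) = x := by
  induction cl generalizing s with
  | nil => simp
  | cons a t ih =>
    simp only [List.foldl_cons, ih, List.mem_cons]
    have hinner : x ∈ L.foldl
        (fun s k => if k < (a.length : Int)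
                    then PySem.Set.add s (PySem.List.slice a none (some k)) else s) s ↔
        x ∈ s ∨ ∃ k ∈ L, k < (a.length : Int) ∧ PySem.List.slice a none (some k) = x := by
      rw [PySem.List.foldl_ite_eq_foldl_filter, PySem.Set.mem_foldl_add]
      simp only [List.mem_filter, decide_eq_true_eq]
      constructor
      · rintro (h | ⟨k, ⟨hk, hlt⟩, hf⟩)
        · exact Or.inl h
        · exact Or.inr ⟨k, hk, hlt, hf.symm⟩
      · rintro (h | ⟨k, hk, hlt, hf⟩)
        · exact Or.inl h
        · exact Or.inr ⟨k, ⟨hk, hlt⟩, hf.symm⟩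
    rw [hinner]
    constructor
    · rintro (⟨h | ⟨k, hk, hf⟩⟩ | ⟨o, ho, hrest⟩)
      · exact Or.inl h
      · exact Or.inr ⟨a, Or.inl rfl, k, hk, hf⟩
      · exact Or.inr ⟨o, Or.inr ho, hrest⟩
    · rintro (h | ⟨o, (rfl | ho), hrest⟩)
      · exact Or.inl (Or.inl h)
      · exact Or.inl (Or.inr hrest)
      · exact Or.inr ⟨o, ho, hrest⟩

theorem B_eq_filter (columns : List (List Int)) :
    remove_subset_alt columns = columns.filter (fun c => !badBool columns c) := by
  unfold remove_subset_alt
  rw [PySem.List.foldl_append_if_eq_filter]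
  simp only [List.nil_append]
  apply List.filter_congr
  intro c hc
  have hcnt : (columns.foldl (fun d cols => d.insert cols (d.getD cols 0 + 1))
      (PySem.Dict.empty : PySem.Dict (List Int) Int)).getD c 0 = (columns.count c : Int) := by
    rw [PySem.Dict.getD_foldl_insert_add_one]
    simp
  have hpref : (PySem.Set.contains (columns.foldl
      (fun s cols => (PySem.Set.ofList (columns.map (fun cols => (cols.length : Int)))).foldl
        (fun s k => if k < (cols.length : Int)
                    then PySem.Set.add s (PySem.List.slice cols none (some k)) else s) s)
      (PySem.Set.empty : PySem.Set (List Int))) c) = true ↔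
      ∃ o ∈ columns, c.length < o.length ∧ o.take c.length = c := by
    rw [PySem.Set.contains_iff, mem_prefixes]
    constructor
    · rintro (h | ⟨o, ho, k, hkL, hlt, hf⟩)
      · exact absurd h (List.not_mem_nil)
      · rw [PySem.Set.mem_ofList, List.mem_map] at hkL
        obtain ⟨c', _, rfl⟩ := hkL
        rw [PySem.List.slice_to_natCast] at hf
        have hlt' : c'.length < o.length := by exact_mod_cast hlt
        have hlen : c.length = c'.length := by
          have := congrArg List.length hf
          simp at this; omega
        refine ⟨o, ho, by omega, ?_⟩
        rw [hlen]; exact hf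
    · rintro ⟨o, ho, hlt, hf⟩
      refine Or.inr ⟨o, ho, (c.length : Int), ?_, by exact_mod_cast hlt, ?_⟩
      · rw [PySem.Set.mem_ofList, List.mem_map]
        exact ⟨c, hc, rfl⟩
      · rw [PySem.List.slice_to_natCast]
        simpa using hf
  rw [hcnt]
  have hone : 1 ≤ columns.count c := List.count_pos_iff.mpr hc
  rcases Bool.eq_false_or_eq_true (badBool columns c) with hb | hb
  · rw [hb]
    rw [badBool_iff] at hb
    rcases hb with h2 | hlong
    · have h1 : ((columns.count c : Int) == 1) = false := by
        rw [Bool.eq_false_iff, ne_eq, beq_iff_eq]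
        intro h; omega
      rw [h1, Bool.false_and]
      rfl
    · have hp : PySem.Set.contains _ c = true := hpref.mpr hlong
      rw [hp]
      simp
  · rw [hb]
    rw [Bool.eq_false_iff, ne_eq, badBool_iff] at hb
    push Not at hb
    obtain ⟨h2, h3⟩ := hb
    have hc1 : columns.count c = 1 := by omega
    have hp : (PySem.Set.contains (columns.foldl
        (fun s cols => (PySem.Set.ofList (columns.map (fun cols => (cols.length : Int)))).foldl
          (fun s k => if k < (cols.length : Int)
                      then PySem.Set.add s (PySem.List.slice cols none (some k)) else s) s)
        (PySem.Set.empty : PySem.Set (List Int))) c) = false := by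
      rw [Bool.eq_false_iff, ne_eq]
      intro h
      obtain ⟨o, ho, hlt, hf⟩ := hpref.mp h
      exact absurd hf (h3 o ho hlt)
    rw [hp, hc1]
    rfl

-- ===== VERDICT (by name: the statement is the Claim_ definition above) =====
theorem remove_subset_spec : Claim_equal_remove_subset := by
  intro columns _
  unfold Spec_remove_subset
  rw [A_eq_filter, B_eq_filter]
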